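-- pv_equiv track=rewrite | github.com/pafricanio/paio-2025-public | day1/rooks/solutions/kostka.py | calculate_moves
-- ===== SOURCE A (Python) =====
-- import collections
--
-- def calculate_moves(A, K):
--     N = len(A)
--     M = len(A[0])
--     total_elements = N * M
--
--     pos = [None] * (total_elements + 1)
--     for r in range(N):
--         for c in range(M):
--             pos[A[r][c]] = (r, c)
--
--     INF = float('inf')
--     dist = [INF] * (total_elements + 1)
--
--     dist[1] = 0
--
--     row_deques = [collections.deque() for _ in range(N)]
--     col_deques = [collections.deque() for _ in range(M)]
--
--     if total_elements > 0:
--         start_r, start_c = pos[1]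
--         row_deques[start_r].append((0, 1))
--         col_deques[start_c].append((0, 1))
--
--     for val in range(2, total_elements + 1):
--         r, c = pos[val]
--
--         min_moves = INF
--
--         while row_deques[r] and row_deques[r][0][1] < val - K:
--             row_deques[r].popleft()
--         if row_deques[r]:
--             min_moves = min(min_moves, row_deques[r][0][0] + 1)
--
--         while col_deques[c] and col_deques[c][0][1] < val - K:
--             col_deques[c].popleft()
--         if col_deques[c]:
--             min_moves = min(min_moves, col_deques[c][0][0] + 1)
--
--         dist[val] = min_moves
--
--         while row_deques[r] and row_deques[r][-1][0] >= dist[val]: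
--             row_deques[r].pop()
--         row_deques[r].append((dist[val], val))
--
--         while col_deques[c] and col_deques[c][-1][0] >= dist[val]:
--             col_deques[c].pop()
--         col_deques[c].append((dist[val], val))
--
--     result_matrix = [[0] * M for _ in range(N)]
--     for i in range(1, total_elements + 1):
--         r, c = pos[i]
--         result_matrix[r][c] = -1 if dist[i] == INF else int(dist[i])
--
--     return result_matrix
-- ===== SOURCE B (Python) =====
-- def calculate_moves(A, K):
--     N = len(A)
--     M = len(A[0])
--     T = N * M
--
--     pos = [None] * (T + 1)
--     for r in range(N):
--         for c in range(M):
--             pos[A[r][c]] = (r, c)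
--
--     dist = [None] * (T + 1)
--     dist[1] = 0
--
--     rows = [[] for _ in range(N)]
--     cols = [[] for _ in range(M)]
--     r0, c0 = pos[1]
--     rows[r0].append((1, 0))
--     cols[c0].append((1, 0))
--
--     for val in range(2, T + 1):
--         r, c = pos[val]
--         best = None
--         for v, d in rows[r] + cols[c]:
--             if val - K <= v and d is not None:
--                 if best is None or d + 1 < best:
--                     best = d + 1
--         dist[val] = best
--         rows[r].append((val, best))
--         cols[c].append((val, best))
--
--     return [[-1 if dist[A[r][c]] is None else dist[A[r][c]] for c in range(M)]
--             for r in range(N)]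
-- ===== Notes on version B (the rewrite author's own statement) =====
-- stated objective: simpler
-- what changed: Replaces the two arrays of monotonic deques (front-pruning, back-popping, front-peek queries) by plain per-row/per-column append-only lists of (value, dist) entries and a direct scan over them for the window minimum, and builds the result matrix by an N*M index sweep reading dist[A[r][c]] instead of scattering through the pos array.
import Mathlib
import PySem

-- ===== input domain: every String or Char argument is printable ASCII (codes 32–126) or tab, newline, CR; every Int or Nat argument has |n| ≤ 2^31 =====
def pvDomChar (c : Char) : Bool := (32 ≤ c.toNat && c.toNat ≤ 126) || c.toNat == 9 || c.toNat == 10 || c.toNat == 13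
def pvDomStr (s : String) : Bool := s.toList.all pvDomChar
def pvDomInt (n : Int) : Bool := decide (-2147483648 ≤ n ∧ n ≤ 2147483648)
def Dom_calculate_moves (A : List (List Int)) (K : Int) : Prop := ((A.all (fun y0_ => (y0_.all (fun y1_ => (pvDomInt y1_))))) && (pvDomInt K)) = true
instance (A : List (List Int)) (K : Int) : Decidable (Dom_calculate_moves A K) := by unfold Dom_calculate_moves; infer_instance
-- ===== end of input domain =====

-- B replaces A's monotonic deques by plain append-only per-row/per-column lists with a direct
-- window scan, and builds the result by mapping over A (objective: simpler; not faster).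

-- ===== PORT A =====
-- shared small helpers (containers/order only; each port keeps its own algorithm)

-- pointwise function update, modelling a Python list/dict cell assignment
def updf {α β : Type} [DecidableEq α] (f : α → β) (i : α) (v : β) : α → β :=
  fun j => if j = i then v else f j

-- Python's float('inf') ⟹ `none`; geE a b = "a ≥ b" in that extended order
def geE : Option Int → Option Int → Bool
  | none, _ => true
  | some _, none => false
  | some a, some b => decide (b ≤ a)

-- x + 1 with inf + 1 = inf
def addOneE : Option Int → Option Int
  | none => none
  | some d => some (d + 1)

-- Python min over the extended order
def minE : Option Int → Option Int → Option Int
  | none, b => b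
  | some a, none => some a
  | some a, some b => some (min a b)

-- the cells of the grid in Python's scan order: (value, (row, col))
def cellsOf (A : List (List Int)) : List (Int × (Int × Int)) :=
  (PySem.List.enumerate A 0).flatMap
    (fun rr => (PySem.List.enumerate rr.2 0).map (fun cc => (cc.2, (rr.1, cc.1))))

-- a Python list index: a negative index wraps by the list length sz
def wrapIdx (sz x : Int) : Int := if x < 0 then x + sz else x

-- the pos list both Pythons fill identically: pos[A[r][c]] = (r, c)
-- (modelled as a function on the wrapped index; sz = len(pos) = N*M+1)
def buildPos (A : List (List Int)) (sz : Int) : Int → Option (Int × Int) :=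
  (cellsOf A).foldl (fun f p => updf f (wrapIdx sz p.1) (some p.2)) (fun _ => none)

-- `while deque and deque[0][1] < t: deque.popleft()`
def pruneFront (t : Int) : List (Option Int × Int) → List (Option Int × Int)
  | [] => []
  | e :: rest => if e.2 < t then pruneFront t rest else e :: rest

-- `while deque and deque[-1][0] >= nd: deque.pop()`
def backPop (nd : Option Int) : List (Option Int × Int) → List (Option Int × Int)
  | [] => []
  | e :: rest =>
    match backPop nd rest with
    | [] => if geE e.1 nd then [] else [e]
    | r => e :: r

structure StA where
  dist : Int → Option Int
  rows : Int → List (Option Int × Int)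
  cols : Int → List (Option Int × Int)

-- one iteration of A's main loop
def stepA (K : Int) (pos : Int → Option (Int × Int)) (st : StA) (val : Int) : StA :=
  let rc := (pos val).getD (0, 0)
  let rdq := pruneFront (val - K) (st.rows rc.1)
  let m1 : Option Int := match rdq with
    | [] => none
    | e :: _ => minE none (addOneE e.1)
  let cdq := pruneFront (val - K) (st.cols rc.2)
  let m2 : Option Int := match cdq with
    | [] => m1
    | e :: _ => minE m1 (addOneE e.1)
  { dist := updf st.dist val m2,
    rows := updf st.rows rc.1 (backPop m2 rdq ++ [(m2, val)]),
    cols := updf st.cols rc.2 (backPop m2 cdq ++ [(m2, val)]) }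

def calculate_moves (A : List (List Int)) (K : Int) : List (List Int) :=
  let N := A.length
  let M := (A.headD []).length
  let T : Int := (N : Int) * (M : Int)
  let pos := buildPos (A.map (fun row => row.take M)) (T + 1)
  let dist0 : Int → Option Int := updf (fun _ => none) 1 (some 0)
  let st0 : StA :=
    if 0 < T then
      let rc := (pos 1).getD (0, 0)
      { dist := dist0,
        rows := updf (fun _ => []) rc.1 [((some 0 : Option Int), (1 : Int))],
        cols := updf (fun _ => []) rc.2 [((some 0 : Option Int), (1 : Int))] }
    else { dist := dist0, rows := fun _ => [], cols := fun _ => [] }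
  let st := (PySem.List.pyRange 2 (T + 1) 1).foldl (stepA K pos) st0
  let res : (Int × Int) → Int :=
    (PySem.List.pyRange 1 (T + 1) 1).foldl
      (fun f i => updf f ((pos i).getD (0, 0))
        (match st.dist i with | none => -1 | some d => d))
      (fun _ => 0)
  (List.range N).map (fun r : Nat => (List.range M).map (fun c : Nat => res ((r : Int), (c : Int))))

-- ===== PORT B =====
-- the body of B's scan: `if val - K <= v and d is not None: best = min-ish`
def scanStep (t : Int) (best : Option Int) (p : Int × Option Int) : Option Int :=
  if t ≤ p.1 then
    match p.2, best with
    | some d, none => some (d + 1)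
    | some d, some b => if d + 1 < b then some (d + 1) else some b
    | none, _ => best
  else best

structure StB where
  dist : Int → Option Int
  rows : Int → List (Int × Option Int)
  cols : Int → List (Int × Option Int)

-- one iteration of B's main loop
def stepB (K : Int) (pos : Int → Option (Int × Int)) (st : StB) (val : Int) : StB :=
  let rc := (pos val).getD (0, 0)
  let best := ((st.rows rc.1) ++ (st.cols rc.2)).foldl (scanStep (val - K)) none
  { dist := updf st.dist val best,
    rows := updf st.rows rc.1 (st.rows rc.1 ++ [(val, best)]),
    cols := updf st.cols rc.2 (st.cols rc.2 ++ [(val, best)]) }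

def calculate_moves_alt (A : List (List Int)) (K : Int) : List (List Int) :=
  let N := A.length
  let M := (A.headD []).length
  let T : Int := (N : Int) * (M : Int)
  let pos := buildPos (A.map (fun row => row.take M)) (T + 1)
  let dist0 : Int → Option Int := updf (fun _ => none) 1 (some 0)
  let rc := (pos 1).getD (0, 0)
  let st0 : StB :=
    { dist := dist0,
      rows := updf (fun _ => []) rc.1 [((1 : Int), (some 0 : Option Int))],
      cols := updf (fun _ => []) rc.2 [((1 : Int), (some 0 : Option Int))] }
  let st := (PySem.List.pyRange 2 (T + 1) 1).foldl (stepB K pos) st0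
  (List.range N).map (fun r : Nat => (List.range M).map (fun c : Nat =>
    match st.dist (wrapIdx (T + 1) ((A.getD r []).getD c 0)) with | none => -1 | some d => d))

-- ===== PRECONDITION & SPEC =====
-- Pre_ is exactly where A returns: a nonempty grid, every row at least as long as row 0,
-- and the used N×M block of values hitting each pos slot 1..N*M once (after Python's
-- negative-index wraparound); everywhere else A raises.
def Pre_calculate_moves (A : List (List Int)) (K : Int) : Prop :=
  A ≠ [] ∧ (A.headD []).length ≠ 0 ∧ (∀ row ∈ A, (A.headD []).length ≤ row.length) ∧
    ((A.map (fun row => row.take (A.headD []).length)).flatten.map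
        (fun x => if x < 0 then
          x + ((A.length : Int) * ((A.headD []).length : Int) + 1) else x)).Perm
      ((List.range (A.length * (A.headD []).length)).map (fun i : Nat => (i : Int) + 1))

instance (A : List (List Int)) (K : Int) : Decidable (Pre_calculate_moves A K) := by
  unfold Pre_calculate_moves; infer_instance

def pvWitness_calculate_moves : List (List Int) × Int := ([[2, 1], [3, 4]], 1)

def Spec_calculate_moves (A : List (List Int)) (K : Int) (out : List (List Int)) : Prop := out = calculate_moves_alt A K
instance (A : List (List Int)) (K : Int) (out : List (List Int)) : Decidable (Spec_calculate_moves A K out) := by unfold Spec_calculate_moves; infer_instance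

-- ===== CLAIM (what is proved, stated in full; the proofs are below) =====
def Claim_equal_calculate_moves : Prop := ∀ (A : List (List Int)) (K : Int), Dom_calculate_moves A K → Pre_calculate_moves A K → Spec_calculate_moves A K (calculate_moves A K)

-- ===== LEMMAS AND PROOFS =====

-- ---- the extended order (none = +inf) ----

theorem geE_refl (a : Option Int) : geE a a = true := by
  cases a <;> simp [geE]

theorem geE_trans {a b c : Option Int} (h1 : geE a b = true) (h2 : geE b c = true) :
    geE a c = true := by
  cases a <;> cases b <;> cases c <;> simp_all only [geE] <;> simp_all <;> omega

theorem geE_total {a b : Option Int} (h : geE a b = false) : geE b a = true := by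
  cases a <;> cases b <;> simp_all only [geE] <;> simp_all <;> omega

theorem geE_antisymm {a b : Option Int} (h1 : geE a b = true) (h2 : geE b a = true) :
    a = b := by
  cases a <;> cases b <;> simp_all only [geE] <;> simp_all <;> omega

theorem geE_none_left (b : Option Int) : geE none b = true := rfl

theorem addOneE_mono {a b : Option Int} (h : geE a b = true) :
    geE (addOneE a) (addOneE b) = true := by
  cases a <;> cases b <;> simp_all only [geE, addOneE] <;> simp_all <;> omega

theorem minE_none_right (a : Option Int) : minE a none = a := by
  cases a <;> rfl

theorem minE_eq_if (a b : Option Int) : minE a b = if geE a b = true then b else a := by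
  cases a <;> cases b <;> simp only [minE, geE] <;>
    first
      | rfl
      | (repeat' split) <;> simp_all <;> omega

theorem minE_assoc (a b c : Option Int) : minE (minE a b) c = minE a (minE b c) := by
  cases a <;> cases b <;> cases c <;> simp [minE, min_assoc]

theorem geE_minE_left (a b : Option Int) : geE a (minE a b) = true := by
  rw [minE_eq_if]; split
  · assumption
  · exact geE_refl a

-- ---- B's window scan as a fold of minE ----

-- the contribution of one stored entry to the scan at threshold t
def spE (t : Int) (p : Int × Option Int) : Option Int :=
  if t ≤ p.1 then addOneE p.2 else none

-- the window minimum B's scan computes over a history list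
def W (t : Int) (h : List (Int × Option Int)) : Option Int :=
  h.foldl (fun b p => minE b (spE t p)) none

theorem scanStep_eq_minE (t : Int) (b : Option Int) (p : Int × Option Int) :
    scanStep t b p = minE b (spE t p) := by
  rcases p with ⟨v, d⟩
  by_cases ht : t ≤ v
  · simp only [scanStep, spE, ht, if_pos]
    cases d with
    | none => cases b <;> rfl
    | some d =>
      cases b with
      | none => rfl
      | some bb =>
        simp only [minE, addOneE, min_def]
        split <;> split <;> first | rfl | omega | (simp; omega)
  · simp only [scanStep, spE, ht, if_neg, not_false_iff]
    cases b <;> rfl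

theorem foldl_minE_init (t : Int) (h : List (Int × Option Int)) (b : Option Int) :
    h.foldl (fun b p => minE b (spE t p)) b = minE b (W t h) := by
  induction h generalizing b with
  | nil => simp [W, minE_none_right]
  | cons p h ih =>
    simp only [List.foldl_cons, W]
    rw [ih, ih (minE none (spE t p))]
    have hn : minE none (spE t p) = spE t p := by cases spE t p <;> rfl
    rw [hn, minE_assoc]

theorem foldl_scan (t : Int) (h : List (Int × Option Int)) (b : Option Int) :
    h.foldl (scanStep t) b = minE b (W t h) := by
  have : h.foldl (scanStep t) b = h.foldl (fun b p => minE b (spE t p)) b := by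
    induction h generalizing b with
    | nil => rfl
    | cons p h ih => simp only [List.foldl_cons, scanStep_eq_minE, ih]
  rw [this, foldl_minE_init]

theorem W_attained (t : Int) (h : List (Int × Option Int)) (b : Option Int) :
    h.foldl (fun b p => minE b (spE t p)) b = b ∨
      ∃ p ∈ h, t ≤ p.1 ∧ h.foldl (fun b p => minE b (spE t p)) b = addOneE p.2 := by
  induction h generalizing b with
  | nil => left; rfl
  | cons p h ih =>
    simp only [List.foldl_cons]
    rcases ih (minE b (spE t p)) with h1 | ⟨q, hq, hqt, hqe⟩
    · rw [h1, minE_eq_if]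
      cases hg : geE b (spE t p) with
      | true =>
        simp only [if_pos]
        by_cases ht : t ≤ p.1
        · right; exact ⟨p, by simp, ht, by simp [spE, ht]⟩
        · left
          have hb : spE t p = none := by simp [spE, ht]
          rw [hb] at hg ⊢
          cases b with
          | none => rfl
          | some x => simp [geE] at hg
      | false => left; simp
    · right; exact ⟨q, by simp [hq], hqt, hqe⟩

theorem W_le_init (t : Int) (h : List (Int × Option Int)) (b : Option Int) :
    geE b (h.foldl (fun b p => minE b (spE t p)) b) = true := by
  induction h generalizing b with
  | nil => exact geE_refl b
  | cons p h ih =>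
    simp only [List.foldl_cons]
    exact geE_trans (geE_minE_left b (spE t p)) (ih (minE b (spE t p)))

theorem W_le (t : Int) (h : List (Int × Option Int)) (p : Int × Option Int)
    (ht : t ≤ p.1) :
    ∀ b : Option Int, p ∈ h →
      geE (addOneE p.2) (h.foldl (fun b p => minE b (spE t p)) b) = true := by
  induction h with
  | nil => intro b hp; simp at hp
  | cons q h ih =>
    intro b hp
    simp only [List.foldl_cons]
    rcases List.mem_cons.mp hp with rfl | hmem
    · refine geE_trans ?_ (W_le_init t h (minE b (spE t p)))
      have hsp : spE t p = addOneE p.2 := by simp [spE, ht]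
      rw [minE_eq_if]
      split
      · rw [hsp]; exact geE_refl _
      · rw [← hsp]; exact geE_total (by simp_all)
    · exact ih (minE b (spE t q)) hmem

-- ---- pruneFront / backPop structure ----

theorem prune_suffix (t : Int) (l : List (Option Int × Int)) : pruneFront t l <:+ l := by
  induction l with
  | nil => exact List.suffix_rfl
  | cons e rest ih =>
    simp only [pruneFront]
    split
    · exact ih.trans (List.suffix_cons e rest)
    · exact List.suffix_rfl

theorem prune_mem {t : Int} {l : List (Option Int × Int)} {e : Option Int × Int}
    (h : e ∈ pruneFront t l) : e ∈ l := (prune_suffix t l).subset h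

theorem prune_chain {R : (Option Int × Int) → (Option Int × Int) → Prop} {t : Int}
    {l : List (Option Int × Int)} (h : l.IsChain R) : (pruneFront t l).IsChain R :=
  h.suffix (prune_suffix t l)

theorem prune_head_ge {t : Int} {l r : List (Option Int × Int)} {e : Option Int × Int}
    (h : pruneFront t l = e :: r) : t ≤ e.2 := by
  induction l with
  | nil => simp [pruneFront] at h
  | cons f rest ih =>
    simp only [pruneFront] at h
    split at h
    · exact ih h
    · cases h; omega

theorem mem_prune {t : Int} {l : List (Option Int × Int)} {e : Option Int × Int}
    (hc : l.IsChain (fun a b => a.2 < b.2)) (he : e ∈ l) (ht : t ≤ e.2) :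
    e ∈ pruneFront t l := by
  induction l with
  | nil => simp at he
  | cons f rest ih =>
    simp only [pruneFront]
    split
    · rcases List.mem_cons.mp he with rfl | hmem
      · omega
      · exact ih hc.tail hmem
    · exact he

theorem bp_reduce_nil {nd : Option Int} {f : Option Int × Int} {rest : List (Option Int × Int)}
    (hbp : backPop nd rest = []) :
    backPop nd (f :: rest) = if geE f.1 nd = true then [] else [f] := by
  simp [backPop, hbp]

theorem bp_reduce_cons {nd : Option Int} {f x : Option Int × Int}
    {rest xs : List (Option Int × Int)} (hbp : backPop nd rest = x :: xs) :
    backPop nd (f :: rest) = f :: x :: xs := by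
  simp [backPop, hbp]

theorem bp_prefix (nd : Option Int) (l : List (Option Int × Int)) : backPop nd l <+: l := by
  induction l with
  | nil => exact List.prefix_rfl
  | cons e rest ih =>
    cases hbp : backPop nd rest with
    | nil =>
      rw [bp_reduce_nil hbp]
      split
      · exact List.nil_prefix
      · exact List.cons_prefix_cons.mpr ⟨rfl, List.nil_prefix⟩
    | cons x xs =>
      rw [bp_reduce_cons hbp]
      exact List.cons_prefix_cons.mpr ⟨rfl, hbp ▸ ih⟩

theorem bp_mem {nd : Option Int} {l : List (Option Int × Int)} {e : Option Int × Int}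
    (h : e ∈ backPop nd l) : e ∈ l := (bp_prefix nd l).subset h

theorem bp_chain {R : (Option Int × Int) → (Option Int × Int) → Prop} {nd : Option Int}
    {l : List (Option Int × Int)} (h : l.IsChain R) : (backPop nd l).IsChain R :=
  h.prefix (bp_prefix nd l)

theorem bp_last {nd : Option Int} {l : List (Option Int × Int)} :
    backPop nd l ≠ [] →
    ∃ e, (backPop nd l).getLast? = some e ∧ geE e.1 nd = false := by
  induction l with
  | nil => intro h; simp [backPop] at h
  | cons f rest ih =>
    intro h
    cases hbp : backPop nd rest with
    | nil =>
      rw [bp_reduce_nil hbp] at h ⊢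
      by_cases hg : geE f.1 nd = true
      · simp [hg] at h
      · refine ⟨f, ?_, by simpa using hg⟩
        simp [hg]
    | cons x xs =>
      rw [bp_reduce_cons hbp] at h ⊢
      rcases ih (by simp [hbp]) with ⟨e, he1, he2⟩
      rw [hbp] at he1
      exact ⟨e, by simpa [List.getLast?_cons_cons] using he1, he2⟩

theorem bp_popped {nd : Option Int} {l : List (Option Int × Int)} {e : Option Int × Int}
    (hmem : e ∈ l) (hout : e ∉ backPop nd l) : geE e.1 nd = true := by
  induction l with
  | nil => simp at hmem
  | cons f rest ih =>
    cases hbp : backPop nd rest with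
    | nil =>
      rw [bp_reduce_nil hbp] at hout
      rcases List.mem_cons.mp hmem with rfl | hm
      · by_cases hg : geE e.1 nd = true
        · exact hg
        · simp [hg] at hout
      · exact ih hm (by simp [hbp])
    | cons x xs =>
      rw [bp_reduce_cons hbp] at hout
      rcases List.mem_cons.mp hmem with rfl | hm
      · simp at hout
      · refine ih hm ?_
        rw [hbp]
        intro hc
        exact hout (List.mem_cons_of_mem _ hc)

-- ---- the deque/history invariant ----

-- dq is A's deque for one row/column, h is B's stored list, t the current window threshold
def DQInv (dq : List (Option Int × Int)) (h : List (Int × Option Int)) (t : Int) : Prop :=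
  (∀ e ∈ dq, (e.2, e.1) ∈ h) ∧
  dq.IsChain (fun a b => a.2 < b.2) ∧
  dq.IsChain (fun a b => geE a.1 b.1 = false) ∧
  (∀ p ∈ h, t ≤ p.1 → ∃ e ∈ dq, p.1 ≤ e.2 ∧ geE p.2 e.1 = true)

theorem dqinv_mono {dq h t t'} (hI : DQInv dq h t) (ht : t ≤ t') : DQInv dq h t' :=
  ⟨hI.1, hI.2.1, hI.2.2.1, fun p hp hpt => hI.2.2.2 p hp (le_trans ht hpt)⟩

-- the head of a dist-chained deque has the least dist
theorem head_minE {f : Option Int × Int} {rest : List (Option Int × Int)}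
    (hc : (f :: rest).IsChain (fun a b => geE a.1 b.1 = false)) :
    ∀ e ∈ f :: rest, geE e.1 f.1 = true := by
  induction rest generalizing f with
  | nil => intro e he; simp at he; subst he; exact geE_refl _
  | cons g rest ih =>
    intro e he
    rcases List.mem_cons.mp he with rfl | hm
    · exact geE_refl _
    · have hfg : geE f.1 g.1 = false := List.isChain_cons_cons.mp hc |>.1
      have := ih (List.isChain_cons_cons.mp hc).2 e hm
      exact geE_trans this (geE_total hfg)

-- A's front-of-deque query equals B's window scan
theorem query_eq {dq : List (Option Int × Int)} {h : List (Int × Option Int)} {t : Int}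
    (hI : DQInv dq h t) :
    (match pruneFront t dq with
      | [] => (none : Option Int)
      | e :: _ => addOneE e.1) = W t h := by
  obtain ⟨hmem, hvals, hdists, hdom⟩ := hI
  cases hpr : pruneFront t dq with
  | nil =>
    rcases W_attained t h none with h0 | ⟨p, hp, hpt, hpe⟩
    · exact h0.symm
    · rcases hdom p hp hpt with ⟨e, he, hev, heg⟩
      have : e ∈ pruneFront t dq := mem_prune hvals he (le_trans hpt hev)
      rw [hpr] at this; simp at this
  | cons f rest =>
    show addOneE f.1 = W t h
    have hfh : (f.2, f.1) ∈ h := hmem f (prune_mem (hpr ▸ List.mem_cons_self))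
    have hft : t ≤ f.2 := prune_head_ge hpr
    apply geE_antisymm
    · -- q ≥ W : q is itself one of the scanned contributions
      exact W_le t h (f.2, f.1) hft none hfh
    · -- W ≥ q : every scanned contribution is ≥ the deque front + 1
      rcases W_attained t h none with h0 | ⟨p, hp, hpt, hpe⟩
      · rw [show W t h = List.foldl (fun b p => minE b (spE t p)) none h from rfl, h0]
        exact geE_none_left _
      · rw [show W t h = List.foldl (fun b p => minE b (spE t p)) none h from rfl, hpe]
        rcases hdom p hp hpt with ⟨e, he, hev, heg⟩
        have hepr : e ∈ pruneFront t dq := mem_prune hvals he (le_trans hpt hev)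
        rw [hpr] at hepr
        have hef : geE e.1 f.1 = true := head_minE (hpr ▸ prune_chain hdists) e hepr
        exact addOneE_mono (geE_trans heg hef)

-- the insert step preserves the invariant
theorem dqinv_insert {dq : List (Option Int × Int)} {h : List (Int × Option Int)} {t v : Int}
    (hI : DQInv dq h t) (hlt : ∀ p ∈ h, p.1 < v) (nd : Option Int) :
    DQInv (backPop nd (pruneFront t dq) ++ [(nd, v)]) (h ++ [(v, nd)]) t := by
  obtain ⟨hmem, hvals, hdists, hdom⟩ := hI
  refine ⟨?_, ?_, ?_, ?_⟩
  · intro e he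
    rcases List.mem_append.mp he with hl | hr
    · exact List.mem_append_left _ (hmem e (prune_mem (bp_mem hl)))
    · simp at hr; subst hr; simp
  · rw [List.isChain_append]
    refine ⟨bp_chain (prune_chain hvals), by simp, ?_⟩
    intro x hx y hy
    simp only [List.head?_cons, Option.mem_some_iff] at hy
    subst hy
    have hxm : x ∈ backPop nd (pruneFront t dq) := List.mem_of_getLast? hx
    have hxh : (x.2, x.1) ∈ h := hmem x (prune_mem (bp_mem hxm))
    simpa using hlt _ hxh
  · rw [List.isChain_append]
    refine ⟨bp_chain (prune_chain hdists), by simp, ?_⟩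
    intro x hx y hy
    simp only [List.head?_cons, Option.mem_some_iff] at hy
    subst hy
    have hne : backPop nd (pruneFront t dq) ≠ [] := by
      intro h0; rw [h0] at hx; simp at hx
    rcases bp_last hne with ⟨e, he1, he2⟩
    have hxe : x = e := by
      rw [he1] at hx; simpa using hx.symm
    subst hxe
    exact he2
  · intro p hp hpt
    rcases List.mem_append.mp hp with hph | hpn
    · rcases hdom p hph hpt with ⟨e, he, hev, heg⟩
      have hepr : e ∈ pruneFront t dq := mem_prune hvals he (le_trans hpt hev)
      by_cases hbp : e ∈ backPop nd (pruneFront t dq)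
      · exact ⟨e, List.mem_append_left _ hbp, hev, heg⟩
      · have hpop : geE e.1 nd = true := bp_popped hepr hbp
        refine ⟨(nd, v), List.mem_append_right _ (by simp), le_of_lt (hlt p hph), ?_⟩
        exact geE_trans heg hpop
    · simp only [List.mem_singleton] at hpn
      subst hpn
      exact ⟨(nd, v), by simp, le_refl v, geE_refl nd⟩

-- ---- the global loop invariant ----

def GInv (K v : Int) (sa : StA) (sb : StB) : Prop :=
  (∀ x, sa.dist x = sb.dist x) ∧
  (∀ i, DQInv (sa.rows i) (sb.rows i) (v - K)) ∧
  (∀ i, DQInv (sa.cols i) (sb.cols i) (v - K)) ∧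
  (∀ i, ∀ p ∈ sb.rows i, p.1 < v) ∧
  (∀ i, ∀ p ∈ sb.cols i, p.1 < v)

-- A's two-deque query equals B's scan over the two stored lists
theorem m2_eq (t : Int) {dqr dqc : List (Option Int × Int)} {hr hc : List (Int × Option Int)}
    (hIr : DQInv dqr hr t) (hIc : DQInv dqc hc t) :
    (match pruneFront t dqc with
      | [] =>
        (match pruneFront t dqr with
          | [] => (none : Option Int)
          | e :: _ => minE none (addOneE e.1))
      | e :: _ =>
        minE
          (match pruneFront t dqr with
            | [] => (none : Option Int)
            | e :: _ => minE none (addOneE e.1))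
          (addOneE e.1)) =
    (hr ++ hc).foldl (scanStep t) none := by
  have h1 : (match pruneFront t dqr with
      | [] => (none : Option Int)
      | e :: _ => minE none (addOneE e.1)) = W t hr := by
    rw [← query_eq hIr]
    cases pruneFront t dqr with
    | nil => rfl
    | cons e r => cases addOneE e.1 <;> rfl
  have h2 : (match pruneFront t dqc with
      | [] => W t hr
      | e :: _ => minE (W t hr) (addOneE e.1)) = minE (W t hr) (W t hc) := by
    rw [← query_eq hIc]
    cases pruneFront t dqc with
    | nil => exact (minE_none_right _).symm
    | cons e r => rfl
  rw [List.foldl_append, foldl_scan, foldl_scan]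
  have hW : minE none (W t hr) = W t hr := by cases W t hr <;> rfl
  rw [hW, ← h2, h1]

-- the value A computes for dist[val] / B computes as `best`, abstracted
def mA (K : Int) (pos : Int → Option (Int × Int)) (st : StA) (val : Int) : Option Int :=
  let rc := (pos val).getD (0, 0)
  let rdq := pruneFront (val - K) (st.rows rc.1)
  let m1 : Option Int := match rdq with
    | [] => none
    | e :: _ => minE none (addOneE e.1)
  let cdq := pruneFront (val - K) (st.cols rc.2)
  match cdq with
  | [] => m1
  | e :: _ => minE m1 (addOneE e.1)

def mB (K : Int) (pos : Int → Option (Int × Int)) (st : StB) (val : Int) : Option Int :=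
  let rc := (pos val).getD (0, 0)
  ((st.rows rc.1) ++ (st.cols rc.2)).foldl (scanStep (val - K)) none

theorem stepA_eq (K : Int) (pos : Int → Option (Int × Int)) (st : StA) (val : Int) :
    stepA K pos st val =
      { dist := updf st.dist val (mA K pos st val),
        rows := updf st.rows ((pos val).getD (0, 0)).1
          (backPop (mA K pos st val)
              (pruneFront (val - K) (st.rows ((pos val).getD (0, 0)).1)) ++
            [(mA K pos st val, val)]),
        cols := updf st.cols ((pos val).getD (0, 0)).2
          (backPop (mA K pos st val)
              (pruneFront (val - K) (st.cols ((pos val).getD (0, 0)).2)) ++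
            [(mA K pos st val, val)]) } := rfl

theorem stepB_eq (K : Int) (pos : Int → Option (Int × Int)) (st : StB) (val : Int) :
    stepB K pos st val =
      { dist := updf st.dist val (mB K pos st val),
        rows := updf st.rows ((pos val).getD (0, 0)).1
          (st.rows ((pos val).getD (0, 0)).1 ++ [(val, mB K pos st val)]),
        cols := updf st.cols ((pos val).getD (0, 0)).2
          (st.cols ((pos val).getD (0, 0)).2 ++ [(val, mB K pos st val)]) } := rfl

theorem step_G {K : Int} {posF : Int → Option (Int × Int)} {v : Int} {sa : StA} {sb : StB}
    (hG : GInv K v sa sb) : GInv K (v + 1) (stepA K posF sa v) (stepB K posF sb v) := by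
  obtain ⟨hdist, hrow, hcol, hrlt, hclt⟩ := hG
  have hm : mA K posF sa v = mB K posF sb v := by
    show (match pruneFront (v - K) (sa.cols ((posF v).getD (0, 0)).2) with
      | [] =>
        (match pruneFront (v - K) (sa.rows ((posF v).getD (0, 0)).1) with
          | [] => (none : Option Int)
          | e :: _ => minE none (addOneE e.1))
      | e :: _ =>
        minE
          (match pruneFront (v - K) (sa.rows ((posF v).getD (0, 0)).1) with
            | [] => (none : Option Int)
            | e :: _ => minE none (addOneE e.1))
          (addOneE e.1)) = _
    rw [m2_eq (v - K) (hrow ((posF v).getD (0, 0)).1) (hcol ((posF v).getD (0, 0)).2)]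
    rfl
  rw [stepA_eq, stepB_eq]
  set rc := (posF v).getD (0, 0)
  set m := mA K posF sa v with hmdef
  rw [← hm]
  have htt : v - K ≤ v + 1 - K := by omega
  refine ⟨?_, ?_, ?_, ?_, ?_⟩
  · intro x
    simp only [updf]
    split
    · rfl
    · exact hdist x
  · intro i
    simp only [updf]
    split
    · next hi =>
      subst hi
      exact dqinv_mono (dqinv_insert (hrow rc.1) (hrlt rc.1) m) htt
    · exact dqinv_mono (hrow i) htt
  · intro i
    simp only [updf]
    split
    · next hi =>
      subst hi
      exact dqinv_mono (dqinv_insert (hcol rc.2) (hclt rc.2) m) htt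
    · exact dqinv_mono (hcol i) htt
  · intro i p hp
    simp only [updf] at hp
    split at hp
    · next hi =>
      rcases List.mem_append.mp hp with hold | hnew
      · exact lt_trans (hrlt rc.1 p hold) (by omega)
      · simp at hnew; rw [hnew]; omega
    · exact lt_trans (hrlt i p hp) (by omega)
  · intro i p hp
    simp only [updf] at hp
    split at hp
    · next hi =>
      rcases List.mem_append.mp hp with hold | hnew
      · exact lt_trans (hclt rc.2 p hold) (by omega)
      · simp at hnew; rw [hnew]; omega
    · exact lt_trans (hclt i p hp) (by omega)

theorem loop_G {K : Int} {posF : Int → Option (Int × Int)} :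
    ∀ (n : Nat) (v0 : Int) (sa : StA) (sb : StB), GInv K v0 sa sb →
      GInv K (v0 + n)
        ((PySem.List.pyRange v0 (v0 + n) 1).foldl (stepA K posF) sa)
        ((PySem.List.pyRange v0 (v0 + n) 1).foldl (stepB K posF) sb) := by
  intro n
  induction n with
  | zero =>
    intro v0 sa sb hG
    rw [PySem.List.pyRange_one_eq_nil (by omega)]
    simpa using hG
  | succ k ih =>
    intro v0 sa sb hG
    rw [PySem.List.pyRange_one_cons (by omega : v0 < v0 + (k + 1 : Nat))]
    simp only [List.foldl_cons]
    have := ih (v0 + 1) (stepA K posF sa v0) (stepB K posF sb v0) (step_G hG)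
    have harr : v0 + 1 + (k : Nat) = v0 + ((k + 1 : Nat) : Int) := by push_cast; ring
    rw [harr] at this
    exact this

-- ---- characterizing folds of keyed updates (pos arrays / result writes / the pos dict) ----

theorem foldl_updf_spec {α β γ : Type} [DecidableEq α] (g : γ → α) (w : γ → β)
    (l : List γ) (f0 : α → β) (x : α) :
    (l.foldl (fun f i => updf f (g i) (w i)) f0) x =
      match l.reverse.find? (fun i => decide (x = g i)) with
      | some i => w i
      | none => f0 x := by
  induction l generalizing f0 with
  | nil => rfl
  | cons i l ih =>
    simp only [List.foldl_cons, List.reverse_cons]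
    rw [ih, List.find?_append]
    cases hf : l.reverse.find? (fun i => decide (x = g i)) with
    | some j => simp
    | none =>
      simp only [Option.none_or]
      cases hx : (decide (x = g i) : Bool) with
      | true =>
        simp only [List.find?_cons, hx]
        simp only [decide_eq_true_eq] at hx
        simp [updf, hx]
      | false =>
        simp only [List.find?_cons, hx, List.find?_nil]
        simp only [decide_eq_false_iff_not] at hx
        simp [updf, hx]

-- generic last-write-wins lookup for a keyed update fold
theorem posL_spec (l : List (Int × (Int × Int))) (x : Int) :
    l.foldl (fun f p => updf f p.1 (some p.2)) (fun _ => none) x =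
      match l.reverse.find? (fun p => decide (x = p.1)) with
      | some p => some p.2
      | none => none := by
  have h := foldl_updf_spec (fun p : Int × (Int × Int) => p.1)
    (fun p => (some p.2 : Option (Int × Int))) l (fun _ => none) x
  rw [h]
  cases l.reverse.find? (fun p => decide (x = p.1)) <;> rfl

theorem find?_eq_some_of_unique {α : Type} (l : List α) (p : α → Bool) (a : α)
    (ha : a ∈ l) (hpa : p a = true) (huniq : ∀ b ∈ l, p b = true → b = a) :
    l.find? p = some a := by
  induction l with
  | nil => simp at ha
  | cons c l ih =>
    by_cases hc : p c = true
    · rw [List.find?_cons_of_pos hc]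
      rw [huniq c List.mem_cons_self hc]
    · rw [List.find?_cons_of_neg (by simpa using hc)]
      have hal : a ∈ l := by
        rcases List.mem_cons.mp ha with rfl | h
        · exact absurd hpa hc
        · exact h
      exact ih hal (fun b hb hpb => huniq b (List.mem_cons_of_mem _ hb) hpb)

-- ---- cells facts ----

theorem cells_keys (A : List (List Int)) : (cellsOf A).map Prod.fst = A.flatten := by
  unfold cellsOf
  rw [List.map_flatMap]
  have h1 : ∀ rr : Int × List Int,
      ((PySem.List.enumerate rr.2 0).map (fun cc => (cc.2, (rr.1, cc.1)))).map Prod.fst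
        = rr.2 := by
    intro rr
    rw [List.map_map]
    exact PySem.List.map_snd_enumerate rr.2 0
  rw [show (fun rr : Int × List Int =>
        ((PySem.List.enumerate rr.2 0).map (fun cc => (cc.2, (rr.1, cc.1)))).map Prod.fst)
      = (fun rr : Int × List Int => rr.2) from funext h1]
  rw [List.flatMap_def, PySem.List.map_snd_enumerate]

theorem mem_cells {A : List (List Int)} {q : Int × (Int × Int)} :
    q ∈ cellsOf A ↔ ∃ (r : Nat) (hr : r < A.length) (c : Nat) (hc : c < A[r].length),
      q = (A[r][c], ((r : Int), (c : Int))) := by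
  unfold cellsOf
  constructor
  · intro hq
    rcases List.mem_flatMap.mp hq with ⟨rr, hrr, hq2⟩
    rcases (PySem.List.mem_enumerate_iff _ _ _).mp hrr with ⟨r, hr, hrr2⟩
    rcases List.mem_map.mp hq2 with ⟨cc, hcc, hq3⟩
    rcases (PySem.List.mem_enumerate_iff _ _ _).mp hcc with ⟨c, hc, hcc2⟩
    subst hrr2
    refine ⟨r, hr, c, by simpa using hc, ?_⟩
    subst hcc2
    simp [← hq3]
  · rintro ⟨r, hr, c, hc, rfl⟩
    apply List.mem_flatMap.mpr
    refine ⟨((r : Int), A[r]), ?_, ?_⟩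
    · exact (PySem.List.mem_enumerate_iff _ _ _).mpr ⟨r, hr, by simp⟩
    · apply List.mem_map.mpr
      exact ⟨((c : Int), A[r][c]), (PySem.List.mem_enumerate_iff _ _ _).mpr ⟨c, hc, by simp⟩, rfl⟩

-- ---- pos correctness on a permutation grid ----

theorem posL_of_mem {l : List (Int × (Int × Int))} (hnd : (l.map Prod.fst).Nodup)
    {x : Int} {rc : Int × Int} (hmem : (x, rc) ∈ l) :
    l.foldl (fun f p => updf f p.1 (some p.2)) (fun _ => none) x = some rc := by
  rw [posL_spec]
  have hf : l.reverse.find? (fun p => decide (x = p.1)) = some (x, rc) := by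
    apply find?_eq_some_of_unique _ _ _ (List.mem_reverse.mpr hmem) (by simp)
    intro b hb hpb
    simp only [decide_eq_true_eq] at hpb
    exact List.inj_on_of_nodup_map hnd (List.mem_reverse.mp hb) hmem (by simp [← hpb])
  rw [hf]

-- the wrapped cell list buildPos actually writes
def cellsW (A : List (List Int)) (sz : Int) : List (Int × (Int × Int)) :=
  (cellsOf A).map (fun p => (wrapIdx sz p.1, p.2))

theorem buildPos_eq_posL (A : List (List Int)) (sz : Int) :
    buildPos A sz =
      (cellsW A sz).foldl (fun f p => updf f p.1 (some p.2)) (fun _ => none) := by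
  unfold buildPos cellsW
  rw [List.foldl_map]

theorem cellsW_keys (A : List (List Int)) (sz : Int) :
    (cellsW A sz).map Prod.fst = A.flatten.map (wrapIdx sz) := by
  unfold cellsW
  rw [List.map_map, ← cells_keys A, List.map_map]
  rfl

theorem mem_cellsW {A : List (List Int)} {sz : Int} {q : Int × (Int × Int)} :
    q ∈ cellsW A sz ↔ ∃ (r : Nat) (hr : r < A.length) (c : Nat) (hc : c < A[r].length),
      q = (wrapIdx sz (A[r][c]), ((r : Int), (c : Int))) := by
  unfold cellsW
  constructor
  · intro hq
    rcases List.mem_map.mp hq with ⟨p, hp, rfl⟩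
    rcases mem_cells.mp hp with ⟨r, hr, c, hc, rfl⟩
    exact ⟨r, hr, c, hc, rfl⟩
  · rintro ⟨r, hr, c, hc, rfl⟩
    exact List.mem_map.mpr ⟨(A[r][c], ((r : Int), (c : Int))),
      mem_cells.mpr ⟨r, hr, c, hc, rfl⟩, rfl⟩

-- ---- initial invariants ----

theorem dqinv_nil (t : Int) : DQInv [] [] t := by
  refine ⟨by simp, by simp, by simp, by simp⟩

theorem dqinv_singleton (t : Int) : DQInv [(some 0, 1)] [(1, some 0)] t := by
  refine ⟨by simp, ?_, ?_, ?_⟩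
  · exact List.isChain_singleton _
  · exact List.isChain_singleton _
  · intro p hp hpt
    simp only [List.mem_singleton] at hp
    subst hp
    exact ⟨(some 0, 1), by simp, le_refl _, geE_refl _⟩

-- A's scatter-build of the result matrix, read back at one cell
theorem result_cell (A : List (List Int)) (T : Int) (dA : Int → Option Int)
    (hnd : ((cellsW A (T + 1)).map Prod.fst).Nodup)
    (hflat : ∀ x : Int, x ∈ A.flatten.map (wrapIdx (T + 1)) ↔ 1 ≤ x ∧ x ≤ T)
    (r c : Nat) (hr : r < A.length) (hc : c < A[r].length) :
    (PySem.List.pyRange 1 (T + 1) 1).foldl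
      (fun f i => updf f ((buildPos A (T + 1) i).getD (0, 0))
        (match dA i with | none => -1 | some d => d))
      (fun _ => 0) ((r : Int), (c : Int)) =
    (match dA (wrapIdx (T + 1) (A[r][c])) with | none => -1 | some d => d) := by
  have h := foldl_updf_spec (fun i => (buildPos A (T + 1) i).getD (0, 0))
    (fun i => (match dA i with | none => (-1 : Int) | some d => d))
    (PySem.List.pyRange 1 (T + 1) 1) (fun _ => 0) ((r : Int), (c : Int))
  rw [h]
  have hmemf : wrapIdx (T + 1) (A[r][c]) ∈ A.flatten.map (wrapIdx (T + 1)) :=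
    List.mem_map_of_mem
      (List.mem_flatten.mpr ⟨A[r], List.getElem_mem hr, List.getElem_mem hc⟩)
  have hfind : (PySem.List.pyRange 1 (T + 1) 1).reverse.find?
      (fun i => decide (((r : Int), (c : Int)) = (buildPos A (T + 1) i).getD (0, 0)))
      = some (wrapIdx (T + 1) (A[r][c])) := by
    apply find?_eq_some_of_unique
    · apply List.mem_reverse.mpr
      apply PySem.List.mem_pyRange_one.mpr
      have := (hflat (wrapIdx (T + 1) (A[r][c]))).mp hmemf
      omega
    · have hpos : buildPos A (T + 1) (wrapIdx (T + 1) (A[r][c]))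
          = some ((r : Int), (c : Int)) := by
        rw [buildPos_eq_posL]
        exact posL_of_mem hnd (mem_cellsW.mpr ⟨r, hr, c, hc, rfl⟩)
      simp [hpos]
    · intro b hb hpb
      have hbr : b ∈ PySem.List.pyRange 1 (T + 1) 1 := List.mem_reverse.mp hb
      have hbT := PySem.List.mem_pyRange_one.mp hbr
      have hbf : b ∈ A.flatten.map (wrapIdx (T + 1)) := (hflat b).mpr (by omega)
      have hbk : b ∈ (cellsW A (T + 1)).map Prod.fst := by rw [cellsW_keys]; exact hbf
      rcases List.mem_map.mp hbk with ⟨q, hq, hq1⟩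
      have hq' : (b, q.2) = q := by rw [← hq1]
      have hposb : buildPos A (T + 1) b = some q.2 := by
        rw [buildPos_eq_posL]
        exact posL_of_mem hnd (hq' ▸ hq)
      simp only [decide_eq_true_eq] at hpb
      rw [hposb] at hpb
      simp only [Option.getD_some] at hpb
      have : (b, ((r : Int), (c : Int))) ∈ cellsW A (T + 1) := by
        rw [hpb, hq']
        exact hq
      rcases mem_cellsW.mp this with ⟨r', hr', c', hc', heq⟩
      have hb2 : b = wrapIdx (T + 1) ((A[r']'hr')[c']'hc') := congrArg Prod.fst heq
      have hrr : ((r : Int), (c : Int)) = (((r' : Nat) : Int), ((c' : Nat) : Int)) :=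
        congrArg Prod.snd heq
      have hre : r' = r := by
        have := congrArg Prod.fst hrr
        simpa using this.symm
      have hce : c' = c := by
        have := congrArg Prod.snd hrr
        simpa using this.symm
      subst hre; subst hce
      exact hb2
  rw [hfind]

-- ===== VERDICT (by name: the statement is the Claim_ definition above) =====
theorem calculate_moves_spec : Claim_equal_calculate_moves := by
  intro A K _hdom hpre
  obtain ⟨hne, hM0, hrect, hperm0⟩ := hpre
  unfold Spec_calculate_moves
  -- AM is the N×M block of A that both programs actually read
  set AM : List (List Int) := A.map (fun row => row.take (A.headD []).length) with hAM
  set T : Int := (A.length : Int) * ((A.headD []).length : Int) with hTdef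
  have hperm : (AM.flatten.map (wrapIdx (T + 1))).Perm
      ((List.range (A.length * (A.headD []).length)).map (fun i : Nat => (i : Int) + 1)) :=
    hperm0
  have hN : 0 < A.length := List.length_pos_iff.mpr hne
  have hT : 0 < T := by
    rw [hTdef]
    have h1 : (0 : Int) < (A.length : Int) := by exact_mod_cast hN
    have h2 : (0 : Int) < ((A.headD []).length : Int) := by
      exact_mod_cast Nat.pos_of_ne_zero hM0
    positivity
  have hndR : ((List.range (A.length * (A.headD []).length)).map
      (fun i : Nat => (i : Int) + 1)).Nodup :=
    List.Nodup.map (by intro a b hab; simpa using hab) List.nodup_range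
  have hnd : ((cellsW AM (T + 1)).map Prod.fst).Nodup := by
    rw [cellsW_keys]
    exact hperm.nodup_iff.mpr hndR
  have hTc : ((A.length * (A.headD []).length : Nat) : Int) = T := by
    rw [hTdef]; push_cast; ring
  have hflat : ∀ x : Int, x ∈ AM.flatten.map (wrapIdx (T + 1)) ↔ 1 ≤ x ∧ x ≤ T := by
    intro x
    rw [hperm.mem_iff]
    constructor
    · intro hx
      rcases List.mem_map.mp hx with ⟨i, hi, rfl⟩
      rw [List.mem_range] at hi
      have h3 : (i : Int) < ((A.length * (A.headD []).length : Nat) : Int) := by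
        exact_mod_cast hi
      rw [hTc] at h3
      omega
    · rintro ⟨h1, h2⟩
      apply List.mem_map.mpr
      refine ⟨(x - 1).toNat, ?_, by omega⟩
      rw [List.mem_range]
      have h3 : ((x - 1).toNat : Int) < ((A.length * (A.headD []).length : Nat) : Int) := by
        rw [hTc]; omega
      exact_mod_cast h3
  -- reduce both ports
  simp only [calculate_moves, calculate_moves_alt]
  rw [if_pos hT]
  -- run the loop invariant (both ports use the same pos and seeds)
  have hG0 : GInv K 2
      { dist := updf (fun _ => none) 1 (some 0),
        rows := updf (fun _ => []) ((buildPos AM (T + 1) 1).getD (0, 0)).1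
          [((some 0 : Option Int), (1 : Int))],
        cols := updf (fun _ => []) ((buildPos AM (T + 1) 1).getD (0, 0)).2
          [((some 0 : Option Int), (1 : Int))] }
      { dist := updf (fun _ => none) 1 (some 0),
        rows := updf (fun _ => []) ((buildPos AM (T + 1) 1).getD (0, 0)).1
          [((1 : Int), (some 0 : Option Int))],
        cols := updf (fun _ => []) ((buildPos AM (T + 1) 1).getD (0, 0)).2
          [((1 : Int), (some 0 : Option Int))] } := by
    refine ⟨fun x => rfl, ?_, ?_, ?_, ?_⟩
    · intro i
      simp only [updf]
      split
      · exact dqinv_singleton _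
      · exact dqinv_nil _
    · intro i
      simp only [updf]
      split
      · exact dqinv_singleton _
      · exact dqinv_nil _
    · intro i p hp
      simp only [updf] at hp
      split at hp
      · simp at hp; rw [hp]; omega
      · simp at hp
    · intro i p hp
      simp only [updf] at hp
      split at hp
      · simp at hp; rw [hp]; omega
      · simp at hp
  have hloop := loop_G (posF := buildPos AM (T + 1)) ((T - 1).toNat) 2 _ _ hG0
  have harr : (2 : Int) + (((T - 1).toNat : Int)) = T + 1 := by omega
  rw [harr] at hloop
  obtain ⟨hdisteq, -, -, -, -⟩ := hloop
  -- compare the two result matrices cell by cell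
  apply List.ext_getElem
  · simp
  · intro n h1 h2
    simp only [List.getElem_map, List.getElem_range]
    have hn : n < A.length := by simpa using h2
    apply List.ext_getElem
    · simp
    · intro c hc1 hc2
      simp only [List.getElem_map, List.getElem_range]
      have hcM : c < (A.headD []).length := by simpa using hc2
      have hnAM : n < AM.length := by rw [hAM]; simpa using hn
      have hrowlen : (A.headD []).length ≤ A[n].length := hrect A[n] (List.getElem_mem hn)
      have hAMrow : AM[n]'hnAM = A[n].take (A.headD []).length := by
        simp [hAM]
      have hcAM : c < (AM[n]'hnAM).length := by
        rw [hAMrow]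
        simpa [List.length_take] using (by omega : c < min (A.headD []).length A[n].length)
      rw [result_cell AM T _ hnd hflat n c hnAM hcAM]
      rw [hdisteq]
      have hcell : (AM[n]'hnAM)[c]'hcAM = (A.getD n []).getD c 0 := by
        have h4 : (A.getD n []) = A[n] := List.getD_eq_getElem A [] hn
        have h5 : c < A[n].length := by omega
        have h6 : (A[n]).getD c 0 = A[n][c] := List.getD_eq_getElem _ 0 h5
        rw [h4, h6]
        have h7 : (AM[n]'hnAM)[c]'hcAM = (A[n].take (A.headD []).length)[c]'(by
          simpa [List.length_take] using (by omega : c < min (A.headD []).length A[n].length)) := by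
          congr 1
        rw [h7]
        exact List.getElem_take
      rw [hcell]
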